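-- pv_equiv track=rewrite | github.com/ElPoot/contabilidad | gestor_contable/app/use_cases/export_report_use_case.py | _tax_block_anchor_columns
-- ===== SOURCE A (Python) =====
-- _TOTAL_AMOUNT_COLUMNS = {
--     "subtotal",
--     "iva_1",
--     "iva_2",
--     "iva_4",
--     "iva_8",
--     "iva_13",
--     "iva_otros",
--     "impuesto_total",
--     "total_comprobante",
-- }
--
-- def _tax_block_anchor_columns(visible_cols):
--     amount_indices = [
--         idx + 1 for idx, col_name in enumerate(visible_cols)
--         if col_name in _TOTAL_AMOUNT_COLUMNS
--     ]
--     if len(amount_indices) >= 2: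
--         return amount_indices[-2], amount_indices[-1]
--     if len(amount_indices) == 1:
--         return max(1, amount_indices[0] - 1), amount_indices[0]
--     return 1, 2
-- ===== SOURCE B (Python) =====
-- _TOTAL_AMOUNT_COLUMNS = {
--     "subtotal",
--     "iva_1",
--     "iva_2",
--     "iva_4",
--     "iva_8",
--     "iva_13",
--     "iva_otros",
--     "impuesto_total",
--     "total_comprobante",
-- }
--
-- def _tax_block_anchor_columns(visible_cols):
--     # Reverse scan with early exit: collect at most the last two matching
--     # 1-based positions, walking from the end toward the front.
--     found = []
--     for idx in range(len(visible_cols) - 1, -1, -1):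
--         if visible_cols[idx] in _TOTAL_AMOUNT_COLUMNS:
--             found.append(idx + 1)
--             if len(found) == 2:
--                 break
--     if len(found) == 2:
--         return found[1], found[0]
--     if len(found) == 1:
--         return max(1, found[0] - 1), found[0]
--     return 1, 2
-- ===== Notes on version B (the rewrite author's own statement) =====
-- stated objective: alternative
-- what changed: Replaces the forward comprehension that materialises all matching indices with a backwards index loop that early-exits after collecting the last two matches, then maps reverse-discovery order back to the tuple.
import Mathlib
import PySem

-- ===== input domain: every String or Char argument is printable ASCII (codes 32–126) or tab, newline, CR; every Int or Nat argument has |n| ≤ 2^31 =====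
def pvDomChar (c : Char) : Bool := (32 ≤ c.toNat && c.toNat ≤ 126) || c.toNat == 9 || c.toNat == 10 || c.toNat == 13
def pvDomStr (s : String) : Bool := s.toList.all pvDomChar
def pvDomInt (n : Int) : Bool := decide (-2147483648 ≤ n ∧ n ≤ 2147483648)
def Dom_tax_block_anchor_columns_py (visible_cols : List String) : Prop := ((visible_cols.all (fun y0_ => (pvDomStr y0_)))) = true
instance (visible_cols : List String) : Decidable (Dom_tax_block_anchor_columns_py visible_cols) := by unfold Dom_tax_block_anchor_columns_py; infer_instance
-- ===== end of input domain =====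

-- B replaces A's forward comprehension over all columns by a backwards scan that
-- stops after the last two matching columns are found (alternative decomposition).

-- ===== PORT A =====
-- module constant _TOTAL_AMOUNT_COLUMNS (a Python set of string literals)
def pvTotalAmountCols : PySem.Set String :=
  PySem.Set.ofList ["subtotal", "iva_1", "iva_2", "iva_4", "iva_8", "iva_13",
                    "iva_otros", "impuesto_total", "total_comprobante"]

-- the comprehension: [idx + 1 for idx, col_name in enumerate(visible_cols) if col_name in _TOTAL_AMOUNT_COLUMNS]
def taxAmountIndices (off : Int) : List String → List Int
  | [] => []
  | c :: t => (if PySem.Set.contains pvTotalAmountCols c then [off + 1] else []) ++ taxAmountIndices (off + 1) t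

def tax_block_anchor_columns_py (visible_cols : List String) : Int × Int :=
  let amount_indices := taxAmountIndices 0 visible_cols
  if amount_indices.length ≥ 2 then
    ((PySem.List.pyGet? amount_indices (-2)).getD 0, (PySem.List.pyGet? amount_indices (-1)).getD 0)
  else if amount_indices.length = 1 then
    (max 1 ((PySem.List.pyGet? amount_indices 0).getD 0 - 1), (PySem.List.pyGet? amount_indices 0).getD 0)
  else (1, 2)

-- ===== PORT B =====
-- the backwards loop: for idx in range(len(vc)-1, -1, -1): … break once two matches collected
-- (i is the number of still-unvisited prefix elements; idx = i - 1; vc.getD is exact: idx is in range)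
def taxAltLoop (vc : List String) : Nat → List Int → List Int
  | 0, found => found
  | j + 1, found =>
    if PySem.Set.contains pvTotalAmountCols (vc.getD j "") then
      let found' := found ++ [(j : Int) + 1]
      if found'.length = 2 then found' else taxAltLoop vc j found'
    else taxAltLoop vc j found

def tax_block_anchor_columns_py_alt (visible_cols : List String) : Int × Int :=
  let found := taxAltLoop visible_cols visible_cols.length []
  if found.length = 2 then (found.getD 1 0, found.getD 0 0)
  else if found.length = 1 then (max 1 (found.getD 0 0 - 1), found.getD 0 0)
  else (1, 2)

-- ===== PRECONDITION & SPEC =====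
def Spec_tax_block_anchor_columns_py (visible_cols : List String) (out : Int × Int) : Prop := out = tax_block_anchor_columns_py_alt visible_cols
instance (visible_cols : List String) (out : Int × Int) : Decidable (Spec_tax_block_anchor_columns_py visible_cols out) := by unfold Spec_tax_block_anchor_columns_py; infer_instance

-- ===== CLAIM (what is proved, stated in full; the proofs are below) =====
def Claim_equal_tax_block_anchor_columns_py : Prop := ∀ (visible_cols : List String), Dom_tax_block_anchor_columns_py visible_cols → Spec_tax_block_anchor_columns_py visible_cols (tax_block_anchor_columns_py visible_cols)

-- ===== LEMMAS AND PROOFS =====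

lemma taxAmountIndices_append (off : Int) (a b : List String) :
    taxAmountIndices off (a ++ b) = taxAmountIndices off a ++ taxAmountIndices (off + a.length) b := by
  induction a generalizing off with
  | nil => simp [taxAmountIndices]
  | cons c t ih =>
      simp only [List.cons_append, taxAmountIndices, ih, List.length_cons]
      have : off + 1 + (t.length : Int) = off + ((t.length : Int) + 1) := by ring
      rw [this]
      simp [List.append_assoc]

lemma taxAmountIndices_take_succ (vc : List String) (j : Nat) (h : j < vc.length) :
    taxAmountIndices 0 (vc.take (j + 1)) =
      taxAmountIndices 0 (vc.take j) ++
        (if PySem.Set.contains pvTotalAmountCols (vc.getD j "") then [(j : Int) + 1] else []) := by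
  rw [List.take_add_one]
  rw [taxAmountIndices_append]
  have hj : vc[j]? = some vc[j] := List.getElem?_eq_getElem h
  have hd : vc.getD j "" = vc[j] := by simp [List.getD, hj]
  have hlen : ((vc.take j).length : Int) = (j : Int) := by
    simp [List.length_take, Nat.min_eq_left (Nat.le_of_lt h)]
  rw [hj, hd, hlen]
  simp [taxAmountIndices]

lemma taxAltLoop_eq (vc : List String) :
    ∀ (i : Nat), i ≤ vc.length → ∀ (found : List Int), found.length ≤ 1 →
      taxAltLoop vc i found =
        found ++ ((taxAmountIndices 0 (vc.take i)).reverse.take (2 - found.length)) := by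
  intro i
  induction i with
  | zero => intro _ found _; simp [taxAltLoop, taxAmountIndices]
  | succ j ih =>
      intro hle found hf
      have hj : j < vc.length := Nat.lt_of_succ_le hle
      have hjle : j ≤ vc.length := Nat.le_of_lt hj
      rw [taxAltLoop]
      rw [taxAmountIndices_take_succ vc j hj]
      by_cases hm : PySem.Set.contains pvTotalAmountCols (vc.getD j "")
      · simp only [hm, if_true]
        have hfl : found.length = 0 ∨ found.length = 1 := by omega
        rcases hfl with h0 | h1
        · have hfe : found = [] := List.length_eq_zero_iff.mp h0
          subst hfe
          simp only [List.nil_append, List.length_cons, List.length_nil]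
          rw [if_neg (by simp)]
          rw [ih hjle [(j : Int) + 1] (by simp)]
          simp [List.reverse_append, List.take_succ_cons]
        · have : (found ++ [(j : Int) + 1]).length = 2 := by simp [h1]
          rw [if_pos this]
          simp [List.reverse_append, h1]
      · simp only [hm]
        rw [ih hjle found hf]
        simp

lemma found_eq (vc : List String) :
    taxAltLoop vc vc.length [] = (taxAmountIndices 0 vc).reverse.take 2 := by
  have := taxAltLoop_eq vc vc.length (Nat.le_refl _) [] (by simp)
  simpa using this

-- ===== VERDICT (by name: the statement is the Claim_ definition above) =====
theorem tax_block_anchor_columns_py_spec : Claim_equal_tax_block_anchor_columns_py := by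
  intro vc _
  unfold Spec_tax_block_anchor_columns_py tax_block_anchor_columns_py tax_block_anchor_columns_py_alt
  rw [found_eq]
  dsimp only
  set L := taxAmountIndices 0 vc with hL
  rcases hr : L.reverse with _ | ⟨b, rest⟩
  · -- no matches
    have hLnil : L = [] := by simpa using congrArg List.reverse hr
    simp [hLnil]
  · rcases rest with _ | ⟨a, rest'⟩
    · -- exactly one match
      have hL1 : L = [b] := by
        have := congrArg List.reverse hr; simpa using this
      simp [hL1, PySem.List.pyGet?, PySem.List.pyIdx?]
    · -- two or more matches: L = rest'.reverse ++ [a, b]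
      have hLe : L = rest'.reverse ++ [a, b] := by
        have := congrArg List.reverse hr; simpa using this
      have hlen : L.length = rest'.length + 2 := by simp [hLe]
      have h2 : 2 ≤ L.length := by omega
      rw [PySem.List.pyGet?_neg_ofNat L 2 (by omega) h2]
      rw [PySem.List.pyGet?_neg_ofNat L 1 (by omega) (by omega)]
      have ha : L[L.length - 2]? = some a := by
        rw [hLe]
        have : rest'.reverse.length + 2 - 2 = rest'.reverse.length + 0 := by simp
        simp only [List.length_append, List.length_reverse, List.length_cons, List.length_nil]
        rw [show rest'.length + (1 + 1) - 2 = rest'.reverse.length + 0 by simp]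
        rw [List.getElem?_append_right (by omega)]
        simp
      have hb : L[L.length - 1]? = some b := by
        rw [hLe]
        simp only [List.length_append, List.length_reverse, List.length_cons, List.length_nil]
        rw [show rest'.length + (1 + 1) - 1 = rest'.reverse.length + 1 by simp]
        rw [List.getElem?_append_right (by omega)]
        simp
      rw [ha, hb]
      simp [h2, List.take]
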